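-- pv_equiv track=rewrite | github.com/sunnyhot/qieman-manager-dashboard | skills/qieman-alpha-signals/scripts/updates_watch.py | keep_recent_ids
-- ===== SOURCE A (Python) =====
-- from typing import Any, Dict, List, Optional, Tuple
--
-- def safe_text(value: Any) -> str:
--     if value is None:
--         return ""
--     return str(value).strip()
--
-- def keep_recent_ids(rows: List[Dict[str, Any]], old_ids: List[str], limit: int = 2000) -> List[str]:
--     current = [safe_text(row.get("uid")) for row in rows if safe_text(row.get("uid"))]
--     merged = current + [value for value in old_ids if value not in set(current)]
--     result: List[str] = []
--     seen = set()
--     for item in merged: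
--         if not item or item in seen:
--             continue
--         seen.add(item)
--         result.append(item)
--         if len(result) >= max(100, limit):
--             break
--     return result
-- ===== SOURCE B (Python) =====
-- from typing import Any, Dict, List
--
--
-- def safe_text(value: Any) -> str:
--     if value is None:
--         return ""
--     return str(value).strip()
--
--
-- def keep_recent_ids(rows: List[Dict[str, Any]], old_ids: List[str], limit: int = 2000) -> List[str]:
--     remaining = max(100, limit)
--     seen = set()
--     out: List[str] = []
--     for source in ((safe_text(row.get("uid")) for row in rows), old_ids):
--         for value in source:
--             if remaining <= 0:
--                 return out
--             if not value or value in seen: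
--                 continue
--             seen.add(value)
--             out.append(value)
--             remaining -= 1
--     return out
-- ===== Notes on version B (the rewrite author's own statement) =====
-- stated objective: simpler
-- what changed: B fuses A's three sequential passes (build filtered 'current', build 'merged' with a redundant not-in-set(current) filter, then a dedup loop) into one streaming pass with a seen-set and a remaining counter over the uid texts followed by old_ids, dropping the intermediate 'merged' list and the membership filter entirely.
import Mathlib
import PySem

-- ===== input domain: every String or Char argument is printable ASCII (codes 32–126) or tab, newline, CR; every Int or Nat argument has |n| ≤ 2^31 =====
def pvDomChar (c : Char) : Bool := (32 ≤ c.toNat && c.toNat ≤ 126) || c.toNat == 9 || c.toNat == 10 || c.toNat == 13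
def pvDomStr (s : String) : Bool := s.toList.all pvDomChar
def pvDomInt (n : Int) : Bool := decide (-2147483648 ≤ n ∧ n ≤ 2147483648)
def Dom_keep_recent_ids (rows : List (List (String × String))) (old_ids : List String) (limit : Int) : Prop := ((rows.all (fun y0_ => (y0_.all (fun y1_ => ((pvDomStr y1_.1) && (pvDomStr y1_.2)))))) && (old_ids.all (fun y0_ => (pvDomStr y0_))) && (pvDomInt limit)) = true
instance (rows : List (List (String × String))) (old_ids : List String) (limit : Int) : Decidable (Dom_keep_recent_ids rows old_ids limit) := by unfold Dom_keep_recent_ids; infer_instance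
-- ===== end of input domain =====

-- B fuses A's three passes (filtered current, merged with a redundant set filter, dedup loop)
-- into one streaming pass with a seen-set and a remaining counter: simpler, same result.

-- ===== PORT A =====
def safe_text (value : Option String) : String :=
  match value with
  | none => ""
  | some s => PySem.Str.strip s

-- A's final for-loop with its break (len(result) >= max(100, limit))
def loopA (cap : Int) : List String → PySem.Set String → List String → List String
  | [], _, result => result
  | item :: rest, seen, result =>
    if item == "" || seen.contains item then loopA cap rest seen result
    else
      let result' := result ++ [item]
      if cap ≤ (result'.length : Int) then result'
      else loopA cap rest (seen.add item) result'

def keep_recent_ids (rows : List (List (String × String))) (old_ids : List String) (limit : Int) : List String :=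
  let current := (rows.map (fun row => safe_text (PySem.Dict.get? ⟨row⟩ "uid"))).filter (fun s => !(s == ""))
  let merged := current ++ old_ids.filter (fun value => !((PySem.Set.ofList current).contains value))
  loopA (max 100 limit) merged PySem.Set.empty []

-- ===== PORT B =====
-- B's inner loop: one streaming pass over a source, threading (remaining, seen, out)
def loopB : List String → Int → PySem.Set String → List String → Int × PySem.Set String × List String
  | [], remaining, seen, out => (remaining, seen, out)
  | value :: rest, remaining, seen, out =>
    if remaining ≤ 0 then (remaining, seen, out)
    else if value == "" || seen.contains value then loopB rest remaining seen out
    else loopB rest (remaining - 1) (seen.add value) (out ++ [value])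

def keep_recent_ids_alt (rows : List (List (String × String))) (old_ids : List String) (limit : Int) : List String :=
  let s1 := loopB (rows.map (fun row => safe_text (PySem.Dict.get? ⟨row⟩ "uid"))) (max 100 limit) PySem.Set.empty []
  let s2 := loopB old_ids s1.1 s1.2.1 s1.2.2
  s2.2.2

-- ===== PRECONDITION & SPEC =====
def Spec_keep_recent_ids (rows : List (List (String × String))) (old_ids : List String) (limit : Int) (out : List String) : Prop := out = keep_recent_ids_alt rows old_ids limit
instance (rows : List (List (String × String))) (old_ids : List String) (limit : Int) (out : List String) : Decidable (Spec_keep_recent_ids rows old_ids limit out) := by unfold Spec_keep_recent_ids; infer_instance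

-- ===== CLAIM (what is proved, stated in full; the proofs are below) =====
def Claim_equal_keep_recent_ids : Prop := ∀ (rows : List (List (String × String))) (old_ids : List String) (limit : Int), Dom_keep_recent_ids rows old_ids limit → Spec_keep_recent_ids rows old_ids limit (keep_recent_ids rows old_ids limit)

-- ===== LEMMAS AND PROOFS =====

theorem loopB_stuck (l : List String) (r : Int) (s : PySem.Set String) (o : List String)
    (h : r ≤ 0) : loopB l r s o = (r, s, o) := by
  cases l with
  | nil => rfl
  | cons x xs => simp [loopB, h]

theorem loopB_append (l₁ l₂ : List String) (r : Int) (s : PySem.Set String) (o : List String) :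
    loopB (l₁ ++ l₂) r s o =
      loopB l₂ (loopB l₁ r s o).1 (loopB l₁ r s o).2.1 (loopB l₁ r s o).2.2 := by
  induction l₁ generalizing r s o with
  | nil => rfl
  | cons x xs ih =>
    by_cases hr : r ≤ 0
    · simp [loopB, hr, loopB_stuck _ _ _ _ hr]
    · simp only [List.cons_append, loopB, if_neg hr]
      split <;> simp [ih]

theorem loopB_filter_empty (l : List String) (r : Int) (s : PySem.Set String) (o : List String) :
    loopB l r s o = loopB (l.filter (fun x => !(x == ""))) r s o := by
  induction l generalizing r s o with
  | nil => rfl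
  | cons x xs ih =>
    by_cases hr : r ≤ 0
    · rw [loopB_stuck _ _ _ _ hr, loopB_stuck _ _ _ _ hr]
    · by_cases hx : x = ""
      · subst hx
        simpa [loopB, hr] using ih r s o
      · have hxb : (x == "") = false := by simp [hx]
        rw [List.filter_cons_of_pos (by simp [hxb])]
        simp only [loopB, if_neg hr, hxb, Bool.false_or]
        split <;> apply ih

theorem loopA_eq_loopB (cap : Int) (l : List String) (s : PySem.Set String) (o : List String)
    (h : (o.length : Int) < cap) : loopA cap l s o = (loopB l (cap - o.length) s o).2.2 := by
  induction l generalizing s o with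
  | nil => rfl
  | cons x xs ih =>
    have hr : ¬ cap - (o.length : Int) ≤ 0 := by omega
    simp only [loopA, loopB, if_neg hr]
    by_cases hcond : (x == "" || PySem.Set.contains s x) = true
    · rw [if_pos hcond, if_pos hcond]
      exact ih s o h
    · rw [if_neg hcond, if_neg hcond]
      by_cases hc : cap ≤ ((o ++ [x]).length : Int)
      · have h0 : cap - (o.length : Int) - 1 ≤ 0 := by
          simp only [List.length_append, List.length_cons, List.length_nil] at hc
          push_cast at hc; omega
        rw [if_pos hc, loopB_stuck _ _ _ _ h0]
      · have hlt : ((o ++ [x]).length : Int) < cap := by omega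
        rw [if_neg hc, ih _ _ hlt]
        have : cap - (o.length : Int) - 1 = cap - ((o ++ [x]).length : Int) := by
          simp only [List.length_append, List.length_cons, List.length_nil]
          push_cast; omega
        rw [this]

theorem contains_add_of_contains (s : PySem.Set String) (x y : String)
    (hy : s.contains y = true) : (s.add x).contains y = true := by
  rw [PySem.Set.contains_iff] at hy ⊢
  rw [PySem.Set.mem_add]
  exact Or.inl hy

theorem loopB_seen_mono (l : List String) (r : Int) (s : PySem.Set String) (o : List String)
    (y : String) (hy : s.contains y = true) : (loopB l r s o).2.1.contains y = true := by
  induction l generalizing r s o with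
  | nil => exact hy
  | cons x xs ih =>
    simp only [loopB]
    split
    · exact hy
    · split
      · exact ih r s o hy
      · exact ih _ _ _ (contains_add_of_contains s x y hy)

theorem loopB_seen_sub (l : List String) (r : Int) (s : PySem.Set String) (o : List String)
    (y : String) (hy : (loopB l r s o).2.1.contains y = true) : s.contains y = true ∨ y ∈ l := by
  induction l generalizing r s o with
  | nil => simp_all [loopB]
  | cons x xs ih =>
    simp only [loopB] at hy
    split at hy
    · simp_all
    · split at hy
      · rcases ih _ _ _ hy with h | h
        · exact Or.inl h
        · exact Or.inr (List.mem_cons_of_mem _ h)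
      · rcases ih _ _ _ hy with h | h
        · rw [PySem.Set.contains_iff, PySem.Set.mem_add] at h
          rcases h with h | h
          · exact Or.inl (by rwa [PySem.Set.contains_iff])
          · exact Or.inr (by simp [h])
        · exact Or.inr (List.mem_cons_of_mem _ h)

theorem loopB_seen_complete (l : List String) (r : Int) (s : PySem.Set String) (o : List String)
    (hpos : 0 < (loopB l r s o).1) (y : String) (hy : y ∈ l) (hne : y ≠ "") :
    (loopB l r s o).2.1.contains y = true := by
  induction l generalizing r s o with
  | nil => cases hy
  | cons x xs ih =>
    have hr : ¬ r ≤ 0 := by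
      intro hr
      rw [loopB_stuck _ _ _ _ hr] at hpos
      omega
    simp only [loopB, if_neg hr] at hpos ⊢
    rcases List.mem_cons.mp hy with rfl | hmem
    · split
      · next hcond =>
        have hsx : s.contains y = true := by
          have : (y == "") = false := by simp [hne]
          simpa [this] using hcond
        exact loopB_seen_mono _ _ _ _ _ hsx
      · exact loopB_seen_mono _ _ _ _ _ (by rw [PySem.Set.contains_iff, PySem.Set.mem_add]; exact Or.inr rfl)
    · split at hpos
      · next hcond =>
        rw [if_pos hcond]
        exact ih _ _ _ hpos hmem
      · next hcond =>
        rw [if_neg hcond]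
        exact ih _ _ _ hpos hmem

theorem loopB_filter_seen (s0 : PySem.Set String) (l : List String) (r : Int)
    (s : PySem.Set String) (o : List String)
    (hsub : ∀ y, s0.contains y = true → s.contains y = true) :
    loopB (l.filter (fun v => !(s0.contains v))) r s o = loopB l r s o := by
  induction l generalizing r s o with
  | nil => rfl
  | cons x xs ih =>
    by_cases hr : r ≤ 0
    · rw [loopB_stuck _ _ _ _ hr, loopB_stuck _ _ _ _ hr]
    · by_cases hx0 : s0.contains x = true
      · rw [List.filter_cons_of_neg (by rw [hx0]; simp)]
        have hcond : (x == "" || PySem.Set.contains s x) = true := by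
          rw [hsub x hx0, Bool.or_true]
        conv_rhs => rw [loopB]
        rw [if_neg hr, if_pos hcond]
        exact ih r s o hsub
      · have hx0' : s0.contains x = false := by
          cases h : s0.contains x
          · rfl
          · exact absurd h hx0
        rw [List.filter_cons_of_pos (by rw [hx0']; rfl)]
        simp only [loopB, if_neg hr]
        split
        · exact ih r s o hsub
        · exact ih _ _ _ (fun y hy => contains_add_of_contains _ _ _ (hsub y hy))

theorem contains_empty_false (y : String) : (PySem.Set.empty : PySem.Set String).contains y = false := by
  rw [Bool.eq_false_iff]
  intro h
  rw [PySem.Set.contains_iff] at h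
  cases h

-- the two tails produce the same output from any common mid-state reached after 'cur'
theorem loopB_key (cur old : List String) (cap : Int)
    (hcur : ∀ y ∈ cur, y ≠ "") :
    (loopB (cur ++ old.filter (fun v => !((PySem.Set.ofList cur).contains v))) cap PySem.Set.empty []).2.2
      = (loopB (cur ++ old) cap PySem.Set.empty []).2.2 := by
  rw [loopB_append, loopB_append]
  set t := loopB cur cap PySem.Set.empty [] with ht
  by_cases hpos : t.1 ≤ 0
  · rw [loopB_stuck _ _ _ _ hpos, loopB_stuck _ _ _ _ hpos]
  · have hpos' : 0 < t.1 := by omega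
    have hiff : ∀ v, (PySem.Set.ofList cur).contains v = t.2.1.contains v := by
      intro v
      by_cases hv : v ∈ cur
      · rw [(PySem.Set.contains_iff _ _).mpr ((PySem.Set.mem_ofList _ _).mpr hv)]
        exact (loopB_seen_complete cur cap PySem.Set.empty [] hpos' v hv (hcur v hv)).symm
      · have h1 : (PySem.Set.ofList cur).contains v = false := by
          rw [Bool.eq_false_iff]
          intro h
          exact hv ((PySem.Set.mem_ofList _ _).mp ((PySem.Set.contains_iff _ _).mp h))
        have h2 : t.2.1.contains v = false := by
          rw [Bool.eq_false_iff]
          intro h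
          rcases loopB_seen_sub cur cap PySem.Set.empty [] v h with h | h
          · rw [contains_empty_false] at h; cases h
          · exact hv h
        rw [h1, h2]
    have hfc : old.filter (fun v => !((PySem.Set.ofList cur).contains v))
        = old.filter (fun v => !(t.2.1.contains v)) := by
      apply List.filter_congr
      intro v _
      rw [hiff]
    rw [hfc]
    exact congrArg (fun p => p.2.2) (loopB_filter_seen t.2.1 old t.1 t.2.1 t.2.2 (fun y hy => hy))

-- ===== VERDICT (by name: the statement is the Claim_ definition above) =====
theorem keep_recent_ids_spec : Claim_equal_keep_recent_ids := by
  intro rows old_ids limit _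
  unfold Spec_keep_recent_ids keep_recent_ids keep_recent_ids_alt
  set f : List (String × String) → String := fun row => safe_text (PySem.Dict.get? ⟨row⟩ "uid") with hf
  set cur0 := rows.map f with hcur0
  set cur := cur0.filter (fun s => !(s == "")) with hcur
  set cap := max 100 limit with hcap
  have hcap0 : (0 : Int) < cap := lt_of_lt_of_le (by norm_num) (le_max_left 100 limit)
  -- A side: the dedup loop is loopB with remaining = cap
  have hA : loopA cap (cur ++ old_ids.filter (fun v => !((PySem.Set.ofList cur).contains v)))
      PySem.Set.empty []
      = (loopB (cur ++ old_ids.filter (fun v => !((PySem.Set.ofList cur).contains v)))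
          cap PySem.Set.empty []).2.2 := by
    have := loopA_eq_loopB cap
      (cur ++ old_ids.filter (fun v => !((PySem.Set.ofList cur).contains v)))
      PySem.Set.empty [] (by simpa using hcap0)
    simpa using this
  rw [hA]
  -- B side: fuse its two passes, then drop empty strings
  change _ = (loopB old_ids (loopB cur0 cap PySem.Set.empty []).1
    (loopB cur0 cap PySem.Set.empty []).2.1 (loopB cur0 cap PySem.Set.empty []).2.2).2.2
  rw [show loopB old_ids (loopB cur0 cap PySem.Set.empty []).1
        (loopB cur0 cap PySem.Set.empty []).2.1 (loopB cur0 cap PySem.Set.empty []).2.2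
      = loopB (cur0 ++ old_ids) cap PySem.Set.empty [] from (loopB_append _ _ _ _ _).symm]
  rw [loopB_filter_empty (cur0 ++ old_ids), List.filter_append]
  -- A side: drop empty strings there too
  rw [loopB_filter_empty (cur ++ old_ids.filter (fun v => !((PySem.Set.ofList cur).contains v))),
    List.filter_append]
  have hcurf : cur.filter (fun x => !(x == "")) = cur := by
    rw [hcur, List.filter_filter]
    apply List.filter_congr
    intro v _
    simp
  rw [hcurf]
  have hcomm : (old_ids.filter (fun v => !((PySem.Set.ofList cur).contains v))).filter
        (fun x => !(x == ""))
      = (old_ids.filter (fun x => !(x == ""))).filter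
        (fun v => !((PySem.Set.ofList cur).contains v)) := by
    rw [List.filter_filter, List.filter_filter]
    apply List.filter_congr
    intro v _
    rw [Bool.and_comm]
  rw [hcomm]
  exact loopB_key cur (old_ids.filter (fun x => !(x == ""))) cap
    (by
      intro y hy
      rw [hcur] at hy
      have := List.of_mem_filter hy
      simpa using this)
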